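-- pv_equiv track=rewrite | github.com/wwhao987/leetcode | LongetsCommSubstring.py | lms
-- ===== SOURCE A (Python) =====
-- def lms(s1,s2):
--     """_summary_
--
--     Args:
--         s1 (_type_): _description_
--         s2 (_type_): _description_
--     """
--     if len(s1)==0 and len(s2)==0:
--         return 0
--     n,m = len(s1),len(s2)
--     cnt = 0
--     for  i in range(n):
--         for j in range(m):
--             if s1[i]==s2[j]:
--                 cnt+=1
--     return cnt
-- ===== SOURCE B (Python) =====
-- def lms(s1, s2):
--     # Count equal-character pairs (i, j) with s1[i] == s2[j] in O(n + m):
--     # build a frequency table of s1 once, then sum lookups over s2.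
--     freq = {}
--     for ch in s1:
--         freq[ch] = freq.get(ch, 0) + 1
--     cnt = 0
--     for ch in s2:
--         cnt += freq.get(ch, 0)
--     return cnt
-- ===== Notes on version B (the rewrite author's own statement) =====
-- stated objective: faster
-- what changed: Replaced the nested index loops comparing every character pair with a one-pass frequency dictionary over s1 and a single lookup pass over s2.
import Mathlib
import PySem

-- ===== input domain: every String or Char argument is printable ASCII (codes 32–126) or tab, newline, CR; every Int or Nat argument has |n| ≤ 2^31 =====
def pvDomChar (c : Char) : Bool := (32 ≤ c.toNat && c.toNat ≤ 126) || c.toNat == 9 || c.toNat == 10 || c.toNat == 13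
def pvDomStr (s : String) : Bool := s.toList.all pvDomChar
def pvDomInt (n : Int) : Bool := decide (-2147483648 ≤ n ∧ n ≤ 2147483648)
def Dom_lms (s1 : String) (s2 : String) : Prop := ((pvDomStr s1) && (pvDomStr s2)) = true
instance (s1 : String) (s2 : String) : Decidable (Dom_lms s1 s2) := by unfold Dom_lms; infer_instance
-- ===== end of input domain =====

-- B replaces A's nested index loops with a one-pass frequency dictionary over s1
-- and a single lookup pass over s2 (same return value; no side effects involved).

-- ===== PORT A =====
-- indices i, j are always in range, so the total pyGetD (default ' ') is exact here
def lms (s1 : String) (s2 : String) : Int :=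
  if PySem.Str.len s1 = 0 ∧ PySem.Str.len s2 = 0 then 0
  else
    let n := PySem.Str.len s1
    let m := PySem.Str.len s2
    (PySem.List.pyRange 0 n 1).foldl (fun cnt i =>
      (PySem.List.pyRange 0 m 1).foldl (fun cnt j =>
        if PySem.List.pyGetD s1.toList i ' ' = PySem.List.pyGetD s2.toList j ' ' then cnt + 1 else cnt) cnt) 0

-- ===== PORT B =====
def lms_alt (s1 : String) (s2 : String) : Int :=
  let freq := s1.toList.foldl (fun d ch => d.insert ch (d.getD ch 0 + 1)) PySem.Dict.empty
  s2.toList.foldl (fun cnt ch => cnt + freq.getD ch 0) 0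

-- ===== PRECONDITION & SPEC =====
def Spec_lms (s1 : String) (s2 : String) (out : Int) : Prop := out = lms_alt s1 s2
instance (s1 : String) (s2 : String) (out : Int) : Decidable (Spec_lms s1 s2 out) := by unfold Spec_lms; infer_instance

-- ===== CLAIM (what is proved, stated in full; the proofs are below) =====
def Claim_equal_lms : Prop := ∀ (s1 : String) (s2 : String), Dom_lms s1 s2 → Spec_lms s1 s2 (lms s1 s2)

-- ===== LEMMAS AND PROOFS =====

theorem pv_countP_beq_comm (l : List Char) (a : Char) :
    l.countP (fun b => a == b) = l.count a := by
  unfold List.count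
  exact List.countP_congr (fun x _ => by simp only [beq_iff_eq]; exact eq_comm)

-- double-counting symmetry: Σ_{a∈l1} count_{l2}(a) = Σ_{b∈l2} count_{l1}(b)
theorem pv_count_symm (l1 l2 : List Char) :
    (l1.map (fun a => (l2.count a : Int))).sum = (l2.map (fun b => (l1.count b : Int))).sum := by
  induction l1 with
  | nil => simp
  | cons a t ih =>
    simp only [List.map_cons, List.sum_cons, ih, List.count_cons]
    have : (l2.map (fun b => ((t.count b + if a == b then 1 else 0 : Nat) : Int))).sum
        = (l2.map (fun b => ((t.count b : Int) + if a == b then 1 else 0))).sum := by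
      congr 1; apply List.map_congr_left; intro b _; push_cast; split <;> simp
    rw [this, PySem.List.sum_map_add_int, PySem.List.sum_map_ite_one_zero (fun b => a == b) l2]
    rw [pv_countP_beq_comm]; ring

-- the inner j-loop of A counts the occurrences of c1 in s2
theorem pv_outer (l1 : List Char) (s2 : String) (init : Int) :
    l1.foldl (fun cnt c1 =>
      (PySem.List.pyRange 0 (s2.toList.length : Int) 1).foldl (fun cnt j =>
        if c1 = PySem.List.pyGetD s2.toList j ' ' then cnt + 1 else cnt) cnt) init
    = init + (l1.map (fun a => (s2.toList.count a : Int))).sum := by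
  induction l1 generalizing init with
  | nil => simp
  | cons a t ih =>
    simp only [List.foldl_cons, ih, List.map_cons, List.sum_cons]
    rw [PySem.List.foldl_pyRange_zero_pyGetD' s2.toList ' '
        (fun cnt c2 => if a = c2 then cnt + 1 else cnt) init]
    rw [show (fun (cnt : Int) c2 => if a = c2 then cnt + 1 else cnt)
          = (fun (cnt : Int) c2 => if a == c2 then cnt + 1 else cnt) from by
        funext cnt c2; simp]
    rw [PySem.List.foldl_count_if, pv_countP_beq_comm]
    ring

theorem pv_lms_eq_sum (s1 s2 : String) :
    lms s1 s2 = (s1.toList.map (fun a => (s2.toList.count a : Int))).sum := by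
  simp only [lms, PySem.Str.len_eq]
  split
  · rename_i h
    have h1 : s1.toList = [] := List.eq_nil_of_length_eq_zero (by exact_mod_cast h.1)
    simp [h1]
  · rw [PySem.List.foldl_pyRange_zero_pyGetD' s1.toList ' '
        (fun cnt c1 => (PySem.List.pyRange 0 (s2.toList.length : Int) 1).foldl (fun cnt j =>
          if c1 = PySem.List.pyGetD s2.toList j ' ' then cnt + 1 else cnt) cnt) 0]
    rw [pv_outer]; ring

theorem pv_lms_alt_eq_sum (s1 s2 : String) :
    lms_alt s1 s2 = (s2.toList.map (fun b => (s1.toList.count b : Int))).sum := by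
  simp only [lms_alt]
  rw [PySem.Dict.foldl_insert_getD_add_one_eq_counter, PySem.List.foldl_add]
  simp [PySem.Dict.getD_counter]

-- ===== VERDICT (by name: the statement is the Claim_ definition above) =====
theorem lms_spec : Claim_equal_lms := by
  intro s1 s2 _
  unfold Spec_lms
  rw [pv_lms_eq_sum, pv_lms_alt_eq_sum, pv_count_symm]
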